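-- pv_equiv track=rewrite | github.com/gistable/gistable | dockerized-gists/4b8a996c90ecf7e86e2a/snippet.py | Group5
-- ===== SOURCE A (Python) =====
-- def Group5(X, Y):
--     import itertools
--     data = sorted(zip(X,Y))
--     query_return = dict()
--     for key, values in itertools.groupby(data, key=lambda x: x[0]):
--         values = [x[1] for x in values]
--         summed_values = sum(values)
--         query_return[key] = (summed_values, len(values))
--
--     return query_return
-- ===== SOURCE B (Python) =====
-- def Group5(X, Y):
--     sums = {}
--     counts = {}
--     for x, y in zip(X, Y):
--         sums[x] = sums.get(x, 0) + y
--         counts[x] = counts.get(x, 0) + 1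
--     return {k: (sums[k], counts[k]) for k in sorted(sums)}
-- ===== Notes on version B (the rewrite author's own statement) =====
-- stated objective: alternative
-- what changed: A sorts all (x,y) pairs and runs itertools.groupby over the sorted list; B accumulates per-key sums and counts in dicts in one pass and sorts only the distinct keys at the end.
import Mathlib
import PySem

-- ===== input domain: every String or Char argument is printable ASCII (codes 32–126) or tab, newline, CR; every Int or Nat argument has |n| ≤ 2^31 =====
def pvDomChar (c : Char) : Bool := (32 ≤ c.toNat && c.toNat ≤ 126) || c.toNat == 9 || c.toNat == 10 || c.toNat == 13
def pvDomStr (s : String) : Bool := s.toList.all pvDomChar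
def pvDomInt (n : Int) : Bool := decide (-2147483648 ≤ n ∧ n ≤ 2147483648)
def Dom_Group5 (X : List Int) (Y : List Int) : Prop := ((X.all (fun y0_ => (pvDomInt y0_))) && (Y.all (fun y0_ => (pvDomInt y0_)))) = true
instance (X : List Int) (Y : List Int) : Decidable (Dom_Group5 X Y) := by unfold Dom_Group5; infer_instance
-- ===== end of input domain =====

-- B replaces A's sort-all-pairs + groupby with a single-pass dict accumulation of sums and
-- counts followed by sorting only the distinct keys (objective: alternative algorithm).

-- ===== PORT A =====
-- itertools.groupby(data, key=lambda x: x[0]): consecutive runs of equal first components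
def pvGroups : List (Int × Int) → List (Int × List (Int × Int))
  | [] => []
  | p :: t =>
      (p.1, p :: t.takeWhile (fun q => q.1 == p.1)) :: pvGroups (t.dropWhile (fun q => q.1 == p.1))
  termination_by l => l.length
  decreasing_by
    simp only [List.length_cons]
    exact Nat.lt_succ_of_le (List.length_dropWhile_le _ _)

def Group5 (X : List Int) (Y : List Int) : List (Int × Int × Int) :=
  let data := PySem.List.sorted2 (X.zip Y) (fun x => x.1) (fun x => x.2)
  let queryReturn :=
    (pvGroups data).foldl
      (fun d g =>
        d.insert g.1 ((g.2.map (fun x => x.2)).sum, ((g.2.map (fun x => x.2)).length : Int)))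
      PySem.Dict.empty
  queryReturn.items

-- ===== PORT B =====
def Group5_alt (X : List Int) (Y : List Int) : List (Int × Int × Int) :=
  let zs := X.zip Y
  let sums := zs.foldl (fun d p => d.insert p.1 (d.getD p.1 0 + p.2)) PySem.Dict.empty
  let counts := zs.foldl (fun d p => d.insert p.1 (d.getD p.1 0 + 1)) PySem.Dict.empty
  let ks := PySem.List.sorted sums.keys (fun k => k)
  (ks.foldl (fun d k => d.insert k (sums.getD k 0, counts.getD k 0)) PySem.Dict.empty).items

-- ===== PRECONDITION & SPEC =====
def Spec_Group5 (X : List Int) (Y : List Int) (out : List (Int × Int × Int)) : Prop := out = Group5_alt X Y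
instance (X : List Int) (Y : List Int) (out : List (Int × Int × Int)) : Decidable (Spec_Group5 X Y out) := by unfold Spec_Group5; infer_instance

-- ===== CLAIM (what is proved, stated in full; the proofs are below) =====
def Claim_equal_Group5 : Prop := ∀ (X : List Int) (Y : List Int), Dom_Group5 X Y → Spec_Group5 X Y (Group5 X Y)

-- ===== LEMMAS AND PROOFS =====

-- the lexicographic 'before' of sorted2 with keys fst, snd
def pvLexB (a b : Int × Int) : Bool :=
  decide (a.1 < b.1) || (!decide (b.1 < a.1) && decide (a.2 < b.2))

theorem pv_insertBy_fst_pairwise (x : Int × Int) (ys : List (Int × Int))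
    (h : ys.Pairwise (fun a b => a.1 ≤ b.1)) :
    (PySem.List.insertBy pvLexB x ys).Pairwise (fun a b => a.1 ≤ b.1) := by
  induction ys with
  | nil => simp [PySem.List.insertBy]
  | cons y ys ih =>
    rcases List.pairwise_cons.mp h with ⟨hy, hys⟩
    rw [PySem.List.insertBy]
    by_cases hb : pvLexB x y = true
    · simp only [hb, if_true]
      have hxy : x.1 ≤ y.1 := by
        simp only [pvLexB, Bool.or_eq_true, Bool.and_eq_true, decide_eq_true_eq,
          Bool.not_eq_true', decide_eq_false_iff_not] at hb
        rcases hb with h1 | ⟨h1, _⟩ <;> omega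
      refine List.pairwise_cons.mpr ⟨?_, h⟩
      intro z hz
      rcases hz with _ | hz
      · exact hxy
      · exact le_trans hxy (hy _ (by assumption))
    · simp only [hb]
      refine List.pairwise_cons.mpr ⟨?_, ih hys⟩
      intro z hz
      rw [PySem.List.mem_insertBy] at hz
      rcases hz with rfl | hz
      · simp only [pvLexB, Bool.or_eq_true, Bool.and_eq_true, decide_eq_true_eq,
          Bool.not_eq_true', decide_eq_false_iff_not] at hb
        omega
      · exact hy _ hz

theorem pv_sorted2_fst_pairwise (zs : List (Int × Int)) :
    (PySem.List.sorted2 zs (fun x => x.1) (fun x => x.2)).Pairwise (fun a b => a.1 ≤ b.1) := by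
  show (List.foldl (fun acc x => PySem.List.insertBy _ x acc) [] zs).Pairwise _
  suffices h : ∀ (acc : List (Int × Int)), acc.Pairwise (fun a b => a.1 ≤ b.1) →
      (List.foldl (fun acc x => PySem.List.insertBy pvLexB x acc) acc zs).Pairwise
        (fun a b => a.1 ≤ b.1) by
    exact h [] (by simp)
  induction zs with
  | nil => intro acc hacc; simpa using hacc
  | cons z zs ih =>
    intro acc hacc
    exact ih _ (pv_insertBy_fst_pairwise z acc hacc)

-- takeWhile/dropWhile against a sorted list are filters
theorem pv_takeWhile_eq_filter (k : Int) (t : List (Int × Int))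
    (h : t.Pairwise (fun a b => a.1 ≤ b.1)) (hk : ∀ q ∈ t, k ≤ q.1) :
    t.takeWhile (fun q => q.1 == k) = t.filter (fun q => q.1 == k) := by
  induction t with
  | nil => rfl
  | cons q t ih =>
    rcases List.pairwise_cons.mp h with ⟨hq, ht⟩
    by_cases hqk : q.1 = k
    · simp only [List.takeWhile_cons, List.filter_cons, hqk, beq_self_eq_true, if_true]
      rw [ih ht (fun r hr => hk r (List.mem_cons_of_mem _ hr))]
    · have hlt : k < q.1 := lt_of_le_of_ne (hk q (List.mem_cons_self)) (Ne.symm hqk)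
      have hnone : ∀ r ∈ t, ¬ (r.1 = k) := by
        intro r hr
        have := hq r hr
        omega
      simp only [List.takeWhile_cons, beq_iff_eq, hqk, if_false]
      rw [eq_comm, List.filter_eq_nil_iff]
      intro r hr
      rcases hr with _ | hr
      · simpa using hqk
      · simpa using hnone r (by assumption)

theorem pv_dropWhile_gt (k : Int) (t : List (Int × Int))
    (h : t.Pairwise (fun a b => a.1 ≤ b.1)) (hk : ∀ q ∈ t, k ≤ q.1) :
    ∀ q ∈ t.dropWhile (fun q => q.1 == k), k < q.1 := by
  induction t with
  | nil => intro q hq; simp [List.dropWhile] at hq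
  | cons q t ih =>
    rcases List.pairwise_cons.mp h with ⟨hq', ht⟩
    by_cases hqk : q.1 = k
    · simp only [List.dropWhile_cons, beq_iff_eq, hqk, if_true]
      exact ih ht (fun r hr => hk r (List.mem_cons_of_mem _ hr))
    · have hlt : k < q.1 := lt_of_le_of_ne (hk q (List.mem_cons_self)) (Ne.symm hqk)
      simp only [List.dropWhile_cons, beq_iff_eq, hqk, if_false]
      intro r hr
      rcases hr with _ | hr
      · exact hlt
      · exact lt_of_lt_of_le hlt (hq' r (by assumption))

-- (G3) the keys of the groups are exactly the keys occurring in the list (no hypotheses)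
theorem pv_groups_keys_mem (l : List (Int × Int)) (k : Int) :
    k ∈ (pvGroups l).map (fun g => g.1) ↔ k ∈ l.map (fun q => q.1) := by
  induction l using pvGroups.induct with
  | case1 => simp [pvGroups]
  | case2 p t ih =>
    rw [pvGroups]
    simp only [List.map_cons, List.mem_cons, ih]
    constructor
    · rintro (rfl | hk)
      · exact Or.inl rfl
      · rcases List.mem_map.mp hk with ⟨q, hq, rfl⟩
        exact Or.inr (List.mem_map.mpr ⟨q, (List.dropWhile_sublist _).mem hq, rfl⟩)
    · rintro (rfl | hk)
      · exact Or.inl rfl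
      · rcases List.mem_map.mp hk with ⟨q, hq, rfl⟩
        rw [← List.takeWhile_append_dropWhile (p := fun q => q.1 == p.1) (l := t),
          List.mem_append] at hq
        rcases hq with hq | hq
        · have hq1 : q.1 = p.1 := by simpa using List.mem_takeWhile_imp hq
          exact Or.inl hq1
        · exact Or.inr (List.mem_map.mpr ⟨q, hq, rfl⟩)

-- (G2) on a key-sorted list the group keys are strictly increasing
theorem pv_groups_keys_pairwise (l : List (Int × Int))
    (h : l.Pairwise (fun a b => a.1 ≤ b.1)) :
    ((pvGroups l).map (fun g => g.1)).Pairwise (· < ·) := by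
  induction l using pvGroups.induct with
  | case1 => simp [pvGroups]
  | case2 p t ih =>
    rcases List.pairwise_cons.mp h with ⟨hp, ht⟩
    have hdrop : (t.dropWhile (fun q => q.1 == p.1)).Pairwise (fun a b => a.1 ≤ b.1) :=
      ht.sublist (List.dropWhile_sublist _)
    rw [pvGroups]
    simp only [List.map_cons]
    refine List.pairwise_cons.mpr ⟨?_, ih hdrop⟩
    intro k hk
    rcases List.mem_map.mp ((pv_groups_keys_mem _ k).mp hk) with ⟨q, hq, rfl⟩
    exact pv_dropWhile_gt p.1 t ht hp q hq

-- (G1) on a key-sorted list each group holds exactly the pairs carrying its key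
theorem pv_groups_vals (l : List (Int × Int))
    (h : l.Pairwise (fun a b => a.1 ≤ b.1)) :
    ∀ g ∈ pvGroups l, g.2 = l.filter (fun q => q.1 == g.1) := by
  induction l using pvGroups.induct with
  | case1 => simp [pvGroups]
  | case2 p t ih =>
    rcases List.pairwise_cons.mp h with ⟨hp, ht⟩
    have hdrop : (t.dropWhile (fun q => q.1 == p.1)).Pairwise (fun a b => a.1 ≤ b.1) :=
      ht.sublist (List.dropWhile_sublist _)
    rw [pvGroups]
    intro g hg
    rcases hg with _ | hg
    · -- the head group
      rw [pv_takeWhile_eq_filter p.1 t ht hp]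
      simp
    · have hg' : g ∈ pvGroups (t.dropWhile (fun q => q.1 == p.1)) := by assumption
      have hkey : g.1 ∈ (t.dropWhile (fun q => q.1 == p.1)).map (fun q => q.1) :=
        (pv_groups_keys_mem _ g.1).mp (List.mem_map.mpr ⟨g, hg', rfl⟩)
      rcases List.mem_map.mp hkey with ⟨q0, hq0, hq0e⟩
      have hgtp : p.1 < g.1 := hq0e ▸ pv_dropWhile_gt p.1 t ht hp q0 hq0
      rw [ih hdrop g hg']
      -- extend the filter from the dropWhile-suffix to the whole list
      have h1 : ¬ (p.1 = g.1) := by omega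
      have h2 : (t.takeWhile (fun q => q.1 == p.1)).filter (fun q => q.1 == g.1) = [] := by
        rw [List.filter_eq_nil_iff]
        intro r hr
        have := (by simpa using List.mem_takeWhile_imp hr : r.1 = p.1)
        simp only [beq_iff_eq, this]
        simpa using h1
      have h3 : t.filter (fun q => q.1 == g.1)
          = (t.dropWhile (fun q => q.1 == p.1)).filter (fun q => q.1 == g.1) := by
        conv_lhs => rw [← List.takeWhile_append_dropWhile (p := fun q => q.1 == p.1) (l := t)]
        rw [List.filter_append, h2, List.nil_append]
      have h4 : ((p.1 == g.1) : Bool) = false := by simpa using h1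
      rw [List.filter_cons]
      simp only [h4, Bool.false_eq_true, if_false]
      exact h3.symm

-- B's accumulation dicts, characterised by lookups
theorem pv_sums_getD (l : List (Int × Int)) (d : PySem.Dict Int Int) (c : Int) :
    (l.foldl (fun d p => d.insert p.1 (d.getD p.1 0 + p.2)) d).getD c 0
      = d.getD c 0 + ((l.filter (fun p => p.1 == c)).map (fun p => p.2)).sum := by
  induction l generalizing d with
  | nil => simp
  | cons p l ih =>
    simp only [List.foldl_cons, ih, List.filter_cons]
    by_cases hpc : p.1 = c
    · simp [hpc]; ring
    · simp [PySem.Dict.getD_insert, hpc, Ne.symm hpc]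

theorem pv_counts_getD (l : List (Int × Int)) (d : PySem.Dict Int Int) (c : Int) :
    (l.foldl (fun d p => d.insert p.1 (d.getD p.1 0 + 1)) d).getD c 0
      = d.getD c 0 + (l.countP (fun p => p.1 == c) : Int) := by
  induction l generalizing d with
  | nil => simp
  | cons p l ih =>
    simp only [List.foldl_cons, ih, List.countP_cons]
    by_cases hpc : p.1 = c
    · simp [hpc]; ring
    · simp [PySem.Dict.getD_insert, hpc, Ne.symm hpc]

theorem pv_main (X Y : List Int) : Group5 X Y = Group5_alt X Y := by
  unfold Group5 Group5_alt
  dsimp only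
  set zs := X.zip Y with hzs
  set data := PySem.List.sorted2 zs (fun x => x.1) (fun x => x.2) with hdata
  have hperm : data.Perm zs := PySem.List.sorted2_perm zs _ _ _
  have hsort : data.Pairwise (fun a b => a.1 ≤ b.1) := pv_sorted2_fst_pairwise zs
  have hGkeysPW := pv_groups_keys_pairwise data hsort
  have hGkeysND : ((pvGroups data).map (fun g => g.1)).Nodup :=
    hGkeysPW.imp (fun h => ne_of_lt h)
  -- A's dict: all group keys are fresh and distinct, so items is a map
  rw [PySem.Dict.items_foldl_insert_fresh (pvGroups data) (fun g => g.1)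
      (fun g => ((g.2.map (fun x => x.2)).sum, ((g.2.map (fun x => x.2)).length : Int)))
      PySem.Dict.empty (fun a _ => PySem.Dict.contains_empty _) hGkeysND]
  -- B's keys
  have hkeys : (zs.foldl (fun d p => d.insert p.1 (d.getD p.1 0 + p.2))
      (PySem.Dict.empty : PySem.Dict Int Int)).keys = PySem.Set.ofList (zs.map (fun p => p.1)) := by
    rw [PySem.Dict.keys_foldl_insert_key zs (fun p => p.1) (fun d p => d.getD p.1 0 + p.2)
      PySem.Dict.empty]
    rw [PySem.Dict.keys_empty, PySem.Set.ofList_eq_foldl]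
    rfl
  rw [hkeys]
  -- sorted(distinct keys) IS the list of group keys
  have hsortedkeys : PySem.List.sorted (PySem.Set.ofList (zs.map (fun p => p.1))) (fun k => k)
      = (pvGroups data).map (fun g => g.1) := by
    apply PySem.List.sorted_eq_of_perm_of_pairwise_lt
    · rw [List.perm_ext_iff_of_nodup hGkeysND (PySem.Set.nodup_ofList _)]
      intro k
      rw [pv_groups_keys_mem data k, PySem.Set.mem_ofList]
      exact (hperm.map (fun q => q.1)).mem_iff
    · exact hGkeysPW
  rw [hsortedkeys]
  -- B's result dict: group keys are fresh and distinct, so items is a map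
  rw [PySem.Dict.items_foldl_insert_fresh ((pvGroups data).map (fun g => g.1)) (fun k => k)
      _ PySem.Dict.empty (fun a _ => PySem.Dict.contains_empty _) (by simpa using hGkeysND)]
  simp only [show (PySem.Dict.empty : PySem.Dict Int (Int × Int)).items = [] from rfl,
    List.nil_append, List.map_map]
  apply List.map_congr_left
  intro g hg
  have hv := pv_groups_vals data hsort g hg
  simp only [Function.comp]
  have hsum := pv_sums_getD zs PySem.Dict.empty g.1
  have hcnt := pv_counts_getD zs PySem.Dict.empty g.1
  rw [PySem.Dict.getD_empty, zero_add] at hsum hcnt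
  have hfil : (data.filter (fun q => q.1 == g.1)).Perm (zs.filter (fun q => q.1 == g.1)) :=
    hperm.filter _
  have hsum2 : (g.2.map (fun x => x.2)).sum
      = ((zs.filter (fun p => p.1 == g.1)).map (fun p => p.2)).sum := by
    rw [hv]; exact (hfil.map _).sum_eq
  have hlen2 : ((g.2.map (fun x => x.2)).length : Int)
      = ((zs.countP (fun p => p.1 == g.1)) : Int) := by
    rw [hv, List.length_map, ← List.countP_eq_length_filter, hperm.countP_eq]
  rw [hsum, hcnt, hsum2, hlen2]

-- ===== VERDICT (by name: the statement is the Claim_ definition above) =====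
theorem Group5_spec : Claim_equal_Group5 := by
  intro X Y _
  exact pv_main X Y
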